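-- pv_equiv track=rewrite | github.com/Badders80/Evolution-Content-Builder | scripts/validate_brand.py | check_banned_words
-- ===== SOURCE A (Python) =====
-- from typing import List, Tuple
--
-- def check_banned_words(text: str, banned_words: List[str]) -> List[Tuple[str, int]]:
--     """Find banned words in text. Returns list of (word, position) tuples."""
--     violations = []
--     text_lower = text.lower()
--
--     for word in banned_words:
--         # Find all occurrences
--         start = 0
--         while True:
--             pos = text_lower.find(word.lower(), start)
--             if pos == -1:
--                 break
--             # Check it's a word boundary
--             before_ok = pos == 0 or not text_lower[pos-1].isalnum()
--             after_ok = pos + len(word) >= len(text_lower) or not text_lower[pos + len(word)].isalnum()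
--             if before_ok and after_ok:
--                 violations.append((word, pos))
--             start = pos + 1
--
--     return violations
-- ===== SOURCE B (Python) =====
-- from typing import List, Tuple
--
-- def check_banned_words(text: str, banned_words: List[str]) -> List[Tuple[str, int]]:
--     """Find banned words in text. Returns list of (word, position) tuples."""
--     t = text.lower()
--     n = len(t)
--     violations = []
--     for word in banned_words:
--         w = word.lower()
--         m = len(w)
--         violations.extend(
--             (word, i)
--             for i in range(n - m + 1)
--             if t[i:i + m] == w
--             and (i == 0 or not t[i - 1].isalnum())
--             and (i + m >= n or not t[i + m].isalnum())
--         )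
--     return violations
-- ===== Notes on version B (the rewrite author's own statement) =====
-- stated objective: alternative
-- what changed: Replaces the while-loop of repeated str.find calls (with -1 sentinel and manual start bookkeeping) by a direct generator over every candidate start position that compares the slice and the boundary flags in one filter.
import Mathlib
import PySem

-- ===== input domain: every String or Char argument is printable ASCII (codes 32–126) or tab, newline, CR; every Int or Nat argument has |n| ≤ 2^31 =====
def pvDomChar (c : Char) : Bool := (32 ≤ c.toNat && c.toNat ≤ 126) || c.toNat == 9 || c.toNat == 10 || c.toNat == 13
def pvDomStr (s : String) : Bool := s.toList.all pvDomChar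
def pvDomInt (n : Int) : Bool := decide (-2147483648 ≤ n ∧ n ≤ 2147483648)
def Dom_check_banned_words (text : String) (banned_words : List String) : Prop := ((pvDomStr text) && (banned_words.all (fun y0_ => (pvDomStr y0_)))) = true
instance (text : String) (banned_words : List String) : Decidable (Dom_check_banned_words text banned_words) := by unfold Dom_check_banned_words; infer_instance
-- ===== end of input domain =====

-- B replaces A's while-loop of repeated str.find calls by a single filtered range of
-- candidate start positions per word (slice compare + boundary flags); objective: alternative.

-- ===== PORT A =====
-- termination helper for the while-loop port (cited in decreasing_by): find past the end is -1
theorem pvFindFrom_past_end (t w : List Char) (s : Nat) (h : t.length < s) :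
    PySem.Chars.findFrom t w (s : Int) none = -1 := by
  simp [PySem.Chars.findFrom]; intro h1; omega

-- the 'while True' loop of A for one word: t = text.lower() (chars), w = word.lower() (chars)
def pvFindLoop (t w : List Char) (word : String) (start : Nat) (acc : List (String × Int)) :
    List (String × Int) :=
  let pos := PySem.Chars.findFrom t w (start : Int) none
  if hne : pos = -1 then acc
  else
    -- text_lower[pos-1] / text_lower[pos+len(word)] are only read in range (short-circuit), so pyGetD is exact
    let before_ok := (pos == 0) || !(PySem.Chars.isalnum (PySem.List.pyGetD t (pos - 1) ' '))
    let after_ok := (decide ((t.length : Int) ≤ pos + w.length)) ||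
      !(PySem.Chars.isalnum (PySem.List.pyGetD t (pos + (w.length : Int)) ' '))
    pvFindLoop t w word (pos.toNat + 1)
      (if before_ok && after_ok then acc ++ [(word, pos)] else acc)
termination_by t.length + 1 - start
decreasing_by
  by_cases hs : start ≤ t.length
  · have hspec := PySem.Chars.findFrom_natCast_spec t w start hs hne
    omega
  · exact absurd (pvFindFrom_past_end t w start (by omega)) hne

def check_banned_words (text : String) (banned_words : List String) : List (String × Int) :=
  let text_lower := PySem.Chars.lower text.toList
  banned_words.foldl
    (fun violations word => pvFindLoop text_lower (PySem.Chars.lower word.toList) word 0 violations)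
    []

-- ===== PORT B =====
def check_banned_words_alt (text : String) (banned_words : List String) : List (String × Int) :=
  let t := PySem.Chars.lower text.toList
  let n : Int := t.length
  banned_words.foldl
    (fun violations word =>
      let w := PySem.Chars.lower word.toList
      let m : Int := w.length
      violations ++
        ((PySem.List.pyRange 0 (n - m + 1) 1).filter (fun i =>
            (PySem.List.slice t (some i) (some (i + m)) == w) &&
            ((i == 0) || !(PySem.Chars.isalnum (PySem.List.pyGetD t (i - 1) ' '))) &&
            ((decide (n ≤ i + m)) || !(PySem.Chars.isalnum (PySem.List.pyGetD t (i + m) ' '))))).map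
          (fun i => (word, i)))
    []

-- ===== PRECONDITION & SPEC =====
def Spec_check_banned_words (text : String) (banned_words : List String) (out : List (String × Int)) : Prop := out = check_banned_words_alt text banned_words
instance (text : String) (banned_words : List String) (out : List (String × Int)) : Decidable (Spec_check_banned_words text banned_words out) := by unfold Spec_check_banned_words; infer_instance

-- ===== CLAIM (what is proved, stated in full; the proofs are below) =====
def Claim_equal_check_banned_words : Prop := ∀ (text : String) (banned_words : List String), Dom_check_banned_words text banned_words → Spec_check_banned_words text banned_words (check_banned_words text banned_words)

-- ===== LEMMAS AND PROOFS =====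

-- the match-with-boundary condition at position i (proof-side characterisation)
def pvCond (t w : List Char) (i : Nat) : Bool :=
  decide (w <+: t.drop i) &&
  ((i == 0) || !(PySem.Chars.isalnum (t.getD (i - 1) ' '))) &&
  ((decide (t.length ≤ i + w.length)) || !(PySem.Chars.isalnum (t.getD (i + w.length) ' ')))

def pvHits (t w : List Char) (start : Nat) : List Nat :=
  (List.range (t.length + 1)).filter (fun i => decide (start ≤ i) && pvCond t w i)

theorem pv_prefix_iff_take (w l : List Char) : w <+: l ↔ l.take w.length = w := by
  constructor
  · intro h; exact (List.prefix_iff_eq_take.mp h).symm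
  · intro h; exact List.prefix_iff_eq_take.mpr h.symm

theorem pv_not_prefix_of_not_infix (t w : List Char) (s i : Nat) (h : ¬ w <:+: t.drop s)
    (hi : s ≤ i) : ¬ w <+: t.drop i := by
  intro hp
  apply h
  have hd : t.drop i = (t.drop s).drop (i - s) := by
    rw [List.drop_drop]; congr 1; omega
  exact List.infix_iff_prefix_suffix.mpr ⟨t.drop i, hp, hd ▸ List.drop_suffix _ _⟩

theorem pv_before_eq (t : List Char) (k : Nat) :
    (((k : Int) == 0) || !(PySem.Chars.isalnum (PySem.List.pyGetD t ((k : Int) - 1) ' ')))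
    = ((k == 0) || !(PySem.Chars.isalnum (t.getD (k - 1) ' '))) := by
  rcases Nat.eq_zero_or_pos k with hk | hk
  · subst hk; simp
  · have h1 : (k : Int) - 1 = ((k - 1 : Nat) : Int) := by omega
    rw [h1, PySem.List.pyGetD_natCast]
    have h2 : ((k : Int) == 0) = (k == 0) := by simp
    rw [h2]

theorem pv_after_eq (t w : List Char) (k : Nat) :
    ((decide ((t.length : Int) ≤ (k : Int) + (w.length : Int))) ||
      !(PySem.Chars.isalnum (PySem.List.pyGetD t ((k : Int) + (w.length : Int)) ' ')))
    = ((decide (t.length ≤ k + w.length)) || !(PySem.Chars.isalnum (t.getD (k + w.length) ' '))) := by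
  have h1 : (k : Int) + (w.length : Int) = ((k + w.length : Nat) : Int) := by push_cast; ring
  rw [h1, PySem.List.pyGetD_natCast]
  have h2 : (decide ((t.length : Int) ≤ ((k + w.length : Nat) : Int))) = decide (t.length ≤ k + w.length) :=
    decide_eq_decide.mpr (by omega)
  rw [h2]

theorem pv_condB_eq (t w : List Char) (k : Nat) :
    ((PySem.List.slice t (some (k : Int)) (some ((k : Int) + (w.length : Int))) == w) &&
      (((k : Int) == 0) || !(PySem.Chars.isalnum (PySem.List.pyGetD t ((k : Int) - 1) ' '))) &&
      ((decide ((t.length : Int) ≤ (k : Int) + (w.length : Int))) ||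
        !(PySem.Chars.isalnum (PySem.List.pyGetD t ((k : Int) + (w.length : Int)) ' '))))
    = pvCond t w k := by
  unfold pvCond
  rw [pv_before_eq, pv_after_eq]
  congr 2
  rw [PySem.List.slice_natCast_add, Bool.eq_iff_iff]
  simp only [beq_iff_eq, decide_eq_true_eq]
  exact (pv_prefix_iff_take w (t.drop k)).symm

theorem pv_filter_range_split (f : Nat → Bool) (r N : Nat) (hr : r ≤ N)
    (h : ∀ i, r ≤ i → i < N → f i = false) :
    (List.range N).filter f = (List.range r).filter f := by
  rw [show N = r + (N - r) from by omega, List.range_add, List.filter_append]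
  have h2 : ((List.range (N - r)).map (r + ·)).filter f = [] := by
    apply List.filter_eq_nil_iff.mpr
    intro a ha
    simp only [List.mem_map, List.mem_range] at ha
    obtain ⟨k, hk, rfl⟩ := ha
    simp [h (r + k) (by omega) (by omega)]
  rw [h2, List.append_nil]

theorem pvHits_eq_nil_of_none (t w : List Char) (start : Nat)
    (h : ∀ i, start ≤ i → ¬ w <+: t.drop i) : pvHits t w start = [] := by
  apply List.filter_eq_nil_iff.mpr
  intro i _
  by_cases hs : start ≤ i
  · simp [pvCond, h i hs]
  · simp [hs]

theorem pvHits_eq_nil_of_past (t w : List Char) (start : Nat) (h : t.length < start) :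
    pvHits t w start = [] := by
  apply List.filter_eq_nil_iff.mpr
  intro i hi
  simp only [List.mem_range] at hi
  simp [show ¬ start ≤ i from by omega]

theorem pvFindLoop_stop (t w : List Char) (word : String) (start : Nat) (acc : List (String × Int))
    (h : PySem.Chars.findFrom t w (start : Int) none = -1) : pvFindLoop t w word start acc = acc := by
  rw [pvFindLoop]
  simp [h]

theorem pvHits_split (t w : List Char) (start p : Nat) (hsp : start ≤ p) (hple : p ≤ t.length)
    (_h2 : w <+: t.drop p) (h3 : ∀ i, start ≤ i → i < p → ¬ w <+: t.drop i) :
    pvHits t w start = (if pvCond t w p then [p] else []) ++ pvHits t w (p + 1) := by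
  unfold pvHits
  rw [show t.length + 1 = (p + 1) + (t.length - p) from by omega, List.range_add,
    List.filter_append, List.filter_append]
  have hA : (List.range (p + 1)).filter (fun i => decide (start ≤ i) && pvCond t w i)
      = if pvCond t w p then [p] else [] := by
    rw [List.range_succ, List.filter_append]
    have hnil : (List.range p).filter (fun i => decide (start ≤ i) && pvCond t w i) = [] := by
      apply List.filter_eq_nil_iff.mpr
      intro i hi
      simp only [List.mem_range] at hi
      by_cases hs : start ≤ i
      · simp [pvCond, h3 i hs hi]
      · simp [hs]
    rw [hnil, List.nil_append, List.filter_singleton]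
    simp [hsp]
  have hB : (List.range (p + 1)).filter (fun i => decide (p + 1 ≤ i) && pvCond t w i) = [] := by
    apply List.filter_eq_nil_iff.mpr
    intro i hi
    simp only [List.mem_range] at hi
    simp [show ¬ (p + 1 ≤ i) from by omega]
  have hC : ((List.range (t.length - p)).map ((p + 1) + ·)).filter
        (fun i => decide (start ≤ i) && pvCond t w i)
      = ((List.range (t.length - p)).map ((p + 1) + ·)).filter
        (fun i => decide (p + 1 ≤ i) && pvCond t w i) := by
    apply List.filter_congr
    intro a ha
    simp only [List.mem_map, List.mem_range] at ha
    obtain ⟨k, _, rfl⟩ := ha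
    simp [show start ≤ p + 1 + k from by omega, show p + 1 ≤ p + 1 + k from by omega]
  rw [hA, hB, hC, List.nil_append]

theorem pvFindLoop_eq (t w : List Char) (word : String) :
    ∀ (N start : Nat) (acc : List (String × Int)), t.length + 1 - start ≤ N →
    pvFindLoop t w word start acc = acc ++ (pvHits t w start).map (fun i : Nat => (word, (i : Int))) := by
  intro N
  induction N with
  | zero =>
      intro start acc hN
      rw [pvFindLoop_stop t w word start acc (pvFindFrom_past_end t w start (by omega)),
        pvHits_eq_nil_of_past t w start (by omega)]
      simp
  | succ N ih =>
      intro start acc hN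
      by_cases hs : start ≤ t.length
      · by_cases hpos : PySem.Chars.findFrom t w (start : Int) none = -1
        · rw [pvFindLoop_stop t w word start acc hpos]
          have hinf := (PySem.Chars.findFrom_natCast_eq_neg_one_iff t w start hs).mp hpos
          rw [pvHits_eq_nil_of_none t w start
            (fun i hi => pv_not_prefix_of_not_infix t w start i hinf hi)]
          simp
        · obtain ⟨h1, h2, h3⟩ := PySem.Chars.findFrom_natCast_spec t w start hs hpos
          set pos := PySem.Chars.findFrom t w (start : Int) none with hposdef
          have hp0 : (0 : Int) ≤ pos := le_trans (by positivity) h1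
          have hpe : pos = ((pos.toNat : Nat) : Int) := (Int.toNat_of_nonneg hp0).symm
          set p := pos.toNat with hpdef
          have hsp : start ≤ p := by omega
          have hple : p ≤ t.length := by
            by_contra hc
            have hd : t.drop p = [] := List.drop_eq_nil_of_le (by omega)
            have hw : w = [] := List.prefix_nil.mp (hd ▸ h2)
            exact h3 start le_rfl (by omega) (hw ▸ List.nil_prefix)
          rw [pvFindLoop]
          rw [dif_neg hpos]
          rw [← hposdef]
          rw [ih (p + 1) _ (by omega)]
          rw [pvHits_split t w start p hsp hple h2 h3, List.map_append]
          have hba : (((pos == 0) || !(PySem.Chars.isalnum (PySem.List.pyGetD t (pos - 1) ' '))) &&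
              ((decide ((t.length : Int) ≤ pos + (w.length : Int))) ||
                !(PySem.Chars.isalnum (PySem.List.pyGetD t (pos + (w.length : Int)) ' '))))
              = pvCond t w p := by
            rw [hpe, pv_before_eq, pv_after_eq]
            unfold pvCond
            rw [decide_eq_true h2]
            simp
          rw [hba]
          split_ifs with hc
          · simp [hpe, List.append_assoc]
          · simp
      · rw [pvFindLoop_stop t w word start acc (pvFindFrom_past_end t w start (by omega)),
          pvHits_eq_nil_of_past t w start (by omega)]
        simp

theorem pv_alt_word_eq (t w : List Char) (word : String) :
    ((PySem.List.pyRange 0 ((t.length : Int) - (w.length : Int) + 1) 1).filter (fun i =>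
        (PySem.List.slice t (some i) (some (i + (w.length : Int))) == w) &&
        ((i == 0) || !(PySem.Chars.isalnum (PySem.List.pyGetD t (i - 1) ' '))) &&
        ((decide ((t.length : Int) ≤ i + (w.length : Int))) ||
          !(PySem.Chars.isalnum (PySem.List.pyGetD t (i + (w.length : Int)) ' '))))).map
      (fun i => (word, i))
    = (pvHits t w 0).map (fun i : Nat => (word, (i : Int))) := by
  rw [PySem.List.pyRange_one, List.filter_map, List.map_map]
  have hfun : ∀ k : Nat, ((fun i : Int =>
        (PySem.List.slice t (some i) (some (i + (w.length : Int))) == w) &&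
        ((i == 0) || !(PySem.Chars.isalnum (PySem.List.pyGetD t (i - 1) ' '))) &&
        ((decide ((t.length : Int) ≤ i + (w.length : Int))) ||
          !(PySem.Chars.isalnum (PySem.List.pyGetD t (i + (w.length : Int)) ' ')))) ∘
        (fun k : Nat => (0 : Int) + (k : Int))) k = pvCond t w k := by
    intro k
    simp only [Function.comp, zero_add]
    exact pv_condB_eq t w k
  rw [List.filter_congr (fun a _ => hfun a)]
  have hhits : pvHits t w 0 = (List.range (t.length + 1)).filter (pvCond t w) := by
    unfold pvHits
    apply List.filter_congr
    intro a _
    simp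
  rw [hhits]
  have hfalse : ∀ i, ((t.length : Int) - (w.length : Int) + 1 - 0).toNat ≤ i →
      i < t.length + 1 → pvCond t w i = false := by
    intro i hri _
    have hnp : ¬ w <+: t.drop i := by
      intro hp
      have h1 := List.IsPrefix.length_le hp
      rw [List.length_drop] at h1
      omega
    simp [pvCond, hnp]
  rw [pv_filter_range_split (pvCond t w) (((t.length : Int) - (w.length : Int) + 1 - 0).toNat)
    (t.length + 1) (by omega) hfalse]
  simp [Function.comp]

-- ===== VERDICT (by name: the statement is the Claim_ definition above) =====
theorem check_banned_words_spec : Claim_equal_check_banned_words := by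
  intro text banned_words hdom
  unfold Spec_check_banned_words check_banned_words check_banned_words_alt
  induction banned_words using List.reverseRecOn with
  | nil => rfl
  | append_singleton ws word ih =>
      have hd : Dom_check_banned_words text ws := by
        simp only [Dom_check_banned_words, List.all_append, Bool.and_eq_true] at hdom ⊢
        tauto
      simp only [List.foldl_append, List.foldl_cons, List.foldl_nil, ih hd]
      rw [pvFindLoop_eq _ _ _ ((PySem.Chars.lower text.toList).length + 1) 0 _ (by omega),
          pv_alt_word_eq]
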